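-- pv_equiv track=rewrite | github.com/bilalakil/challenges | codechef/cook77/chefarrb.py | calc_backwards
-- ===== SOURCE A (Python) =====
-- def calc_backwards(k, integers):
--     '''
--     Loops backwards through the array for a running sum.
--     Not sure if backwards is necessary - that's just how the idea came to me.
--
--     Example case:
--     7 3
--     3 1 1 2 1 1 1
--
--     Iteration:   0 (1)  1 (1)   2 (1)       3 (2)           4 (1)   5 (1)   6 (3)
--     Hanging:     [1]    [1, 1]  [1, 1, 1]   [2]             [1]     [1, 1]  []
--     Accumulator: +0     +0      +0          +3 [3, 3, 3]    +4 [3]  +4      +7 [3, 3]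
--     Result:      0      0       0           3               7       11      18
--
--     Slow for many small Ai, otherwise slightly faster than calc_skip.
--
--     Returns an integer.
--     '''
--
--     result = 0
--     accumulated = 0
--     hanging = []
--
--     for i in reversed(integers):
--         hanging = list(map(lambda x: x | i, hanging))
--         hanging.append(i)
--
--         for j in range(len(hanging), 0, -1):
--             if hanging[j - 1] >= k:
--                 hanging = hanging[j:]
--                 accumulated += j
--
--                 break
--
--         result += accumulated
--
--     return result
-- ===== SOURCE B (Python) =====
-- def _push(v, c, runs):
--     # prepend run (v, c), merging with the head run when values are equal
--     if runs and runs[0][0] == v: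
--         return [(v, c + runs[0][1])] + runs[1:]
--     return [(v, c)] + runs
--
--
-- def _or_all(runs, x):
--     # OR x into every run value, merging runs that become equal
--     if not runs:
--         return []
--     v, c = runs[0]
--     return _push(v | x, c, _or_all(runs[1:], x))
--
--
-- def _cut(k, runs):
--     # drop the first run whose value is >= k and everything after it;
--     # return (kept runs, number of subarrays dropped)
--     if not runs:
--         return [], 0
--     v, c = runs[0]
--     if v >= k:
--         return [], c + sum(cc for _, cc in runs[1:])
--     kept, d = _cut(k, runs[1:])
--     return [(v, c)] + kept, d
--
--
-- def calc_backwards(k, integers):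
--     # Run-length-compressed sliding ORs: runs[(v, c)] lists, in increasing
--     # end order, the distinct OR values of subarrays starting at the current
--     # position, so each step costs O(#distinct ORs) instead of O(n).
--     result = 0
--     accumulated = 0
--     runs = []
--     for x in reversed(integers):
--         runs, dropped = _cut(k, _push(x, 1, _or_all(runs, x)))
--         accumulated += dropped
--         result += accumulated
--     return result
-- ===== Notes on version B (the rewrite author's own statement) =====
-- stated objective: faster
-- what changed: Replaced A's explicit list of all pending OR values (re-ORed and rescanned each iteration, O(n) entries) by a run-length-compressed list of the O(log maxA) distinct OR values with multiplicities, cut at the first value >= k.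
import Mathlib
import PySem

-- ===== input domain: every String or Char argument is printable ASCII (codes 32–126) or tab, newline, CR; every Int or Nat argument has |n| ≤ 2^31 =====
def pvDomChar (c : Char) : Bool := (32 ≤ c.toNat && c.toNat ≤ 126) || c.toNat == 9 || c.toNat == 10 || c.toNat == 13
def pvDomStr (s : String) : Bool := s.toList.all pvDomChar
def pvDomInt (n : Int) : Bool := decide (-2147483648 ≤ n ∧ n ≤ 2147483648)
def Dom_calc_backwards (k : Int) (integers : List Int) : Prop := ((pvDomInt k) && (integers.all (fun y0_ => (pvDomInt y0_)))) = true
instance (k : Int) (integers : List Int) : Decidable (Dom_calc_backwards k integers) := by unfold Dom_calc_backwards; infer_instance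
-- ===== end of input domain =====

-- B replaces A's list of all pending OR values by a run-length-compressed list of the
-- distinct OR values with multiplicities (objective: faster, asymptotically).

-- ===== PORT A =====
-- the inner 'for j in range(len(hanging), 0, -1): … break' loop
def pvInnerA (k : Int) (hanging : List Int) (accumulated : Int) : List Int → List Int × Int
  | [] => (hanging, accumulated)
  | j :: js =>
    match PySem.List.pyGet? hanging (j - 1) with
    | some v =>
      if v ≥ k then (PySem.List.slice hanging (some j) none, accumulated + j)
      else pvInnerA k hanging accumulated js
    | none => (hanging, accumulated)  -- unreachable: every j drawn from range(len,0,-1) is in range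

def calc_backwards (k : Int) (integers : List Int) : Int :=
  (integers.reverse.foldl
    (fun (st : Int × Int × List Int) (i : Int) =>
      let hanging := st.2.2.map (fun x => PySem.Int.bor x i) ++ [i]
      let p := pvInnerA k hanging st.2.1 (PySem.List.pyRange (hanging.length : Int) 0 (-1))
      (st.1 + p.2, p.2, p.1))
    (0, 0, [])).1

-- ===== PORT B =====
def pvPush (v c : Int) (runs : List (Int × Int)) : List (Int × Int) :=
  match runs with
  | (w, d) :: rest => if w = v then (v, c + d) :: rest else (v, c) :: (w, d) :: rest
  | [] => [(v, c)]

def pvOrAll (runs : List (Int × Int)) (x : Int) : List (Int × Int) :=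
  match runs with
  | [] => []
  | (v, c) :: rest => pvPush (PySem.Int.bor v x) c (pvOrAll rest x)

def pvCut (k : Int) : List (Int × Int) → List (Int × Int) × Int
  | [] => ([], 0)
  | (v, c) :: rest =>
    if v ≥ k then ([], c + (rest.map Prod.snd).sum)
    else
      let p := pvCut k rest
      ((v, c) :: p.1, p.2)

def calc_backwards_alt (k : Int) (integers : List Int) : Int :=
  (integers.reverse.foldl
    (fun (st : Int × Int × List (Int × Int)) (x : Int) =>
      let p := pvCut k (pvPush x 1 (pvOrAll st.2.2 x))
      (st.1 + (st.2.1 + p.2), st.2.1 + p.2, p.1))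
    (0, 0, [])).1

-- ===== PRECONDITION & SPEC =====
def Spec_calc_backwards (k : Int) (integers : List Int) (out : Int) : Prop := out = calc_backwards_alt k integers
instance (k : Int) (integers : List Int) (out : Int) : Decidable (Spec_calc_backwards k integers out) := by unfold Spec_calc_backwards; infer_instance

-- ===== CLAIM (what is proved, stated in full; the proofs are below) =====
def Claim_equal_calc_backwards : Prop := ∀ (k : Int) (integers : List Int), Dom_calc_backwards k integers → Spec_calc_backwards k integers (calc_backwards k integers)

-- ===== LEMMAS AND PROOFS =====

-- decode a run-length-compressed list (ends-ascending) back to the plain value list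
def pvDecode (runs : List (Int × Int)) : List Int :=
  runs.flatMap (fun p => List.replicate p.2.toNat p.1)

-- abstract form of the cut performed by both inner loops, on the ends-ascending list
def pvCutL (k : Int) : List Int → List Int × Int
  | [] => ([], 0)
  | v :: rest =>
    if v ≥ k then ([], 1 + (rest.length : Int))
    else
      let p := pvCutL k rest
      (v :: p.1, p.2)

theorem pvDecode_push (v c : Int) (runs : List (Int × Int)) (hc : 0 ≤ c)
    (hruns : ∀ p ∈ runs, 1 ≤ p.2) :
    pvDecode (pvPush v c runs) = List.replicate c.toNat v ++ pvDecode runs := by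
  match runs with
  | [] => simp [pvPush, pvDecode]
  | (w, d) :: rest =>
    by_cases hw : w = v
    · have hd : 1 ≤ d := hruns (w, d) (by simp)
      simp [pvPush, hw, pvDecode, List.flatMap_cons]
      have : (c + d).toNat = c.toNat + d.toNat := by omega
      rw [this, List.replicate_add, List.append_assoc]
    · simp [pvPush, hw, pvDecode, List.flatMap_cons]


theorem pvPush_pos (v c : Int) (runs : List (Int × Int)) (hc : 1 ≤ c)
    (hruns : ∀ p ∈ runs, 1 ≤ p.2) : ∀ p ∈ pvPush v c runs, 1 ≤ p.2 := by
  match runs with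
  | [] => simpa [pvPush] using hc
  | (w, d) :: rest =>
    by_cases hw : w = v
    · have hd : 1 ≤ d := hruns (w, d) (by simp)
      simp only [pvPush, hw]
      intro p hp
      rcases List.mem_cons.1 hp with h | h
      · subst h; simp; omega
      · exact hruns p (by simp [h])
    · simp only [pvPush, if_neg hw]
      intro p hp
      rcases List.mem_cons.1 hp with h | h
      · subst h; simpa using hc
      · exact hruns p h

theorem pvOrAll_pos (runs : List (Int × Int)) (x : Int) (hruns : ∀ p ∈ runs, 1 ≤ p.2) :
    ∀ p ∈ pvOrAll runs x, 1 ≤ p.2 := by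
  induction runs with
  | nil => simp [pvOrAll]
  | cons hd tl ih =>
    obtain ⟨v, c⟩ := hd
    exact pvPush_pos _ c _ (hruns (v, c) (by simp))
      (ih (fun p hp => hruns p (by simp [hp])))


theorem pvDecode_orAll (runs : List (Int × Int)) (x : Int) (hruns : ∀ p ∈ runs, 1 ≤ p.2) :
    pvDecode (pvOrAll runs x) = (pvDecode runs).map (fun y => PySem.Int.bor y x) := by
  induction runs with
  | nil => simp [pvOrAll, pvDecode]
  | cons hd tl ih =>
    obtain ⟨v, c⟩ := hd
    have hc : 1 ≤ c := hruns (v, c) (by simp)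
    have htl : ∀ p ∈ tl, 1 ≤ p.2 := fun p hp => hruns p (by simp [hp])
    rw [pvOrAll, pvDecode_push _ _ _ (by omega) (pvOrAll_pos tl x htl), ih htl]
    simp [pvDecode, List.flatMap_cons, List.map_replicate]


theorem pvCut_pos (k : Int) (runs : List (Int × Int)) (hruns : ∀ p ∈ runs, 1 ≤ p.2) :
    ∀ p ∈ (pvCut k runs).1, 1 ≤ p.2 := by
  induction runs with
  | nil => simp [pvCut]
  | cons hd tl ih =>
    obtain ⟨v, c⟩ := hd
    have htl : ∀ p ∈ tl, 1 ≤ p.2 := fun p hp => hruns p (by simp [hp])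
    by_cases hv : v ≥ k
    · simp [pvCut, hv]
    · simp only [pvCut, if_neg hv]
      intro p hp
      rcases List.mem_cons.1 hp with h | h
      · subst h; exact hruns (v, c) (by simp)
      · exact ih htl p h



theorem pvDecode_length (tl : List (Int × Int)) (h : ∀ p ∈ tl, 1 ≤ p.2) :
    ((pvDecode tl).length : Int) = (tl.map Prod.snd).sum := by
  induction tl with
  | nil => simp [pvDecode]
  | cons p ps ih =>
    have hp : 1 ≤ p.2 := h p (by simp)
    have hps : ∀ q ∈ ps, 1 ≤ q.2 := fun q hq => h q (by simp [hq])
    simp only [pvDecode, List.flatMap_cons, List.length_append, List.length_replicate,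
      List.map_cons, List.sum_cons]
    have := ih hps
    simp only [pvDecode] at this
    push_cast
    omega


theorem pvCutL_replicate (k v : Int) (m : Nat) (l : List Int) (hv : ¬ v ≥ k) :
    pvCutL k (List.replicate m v ++ l) =
      (List.replicate m v ++ (pvCutL k l).1, (pvCutL k l).2) := by
  induction m with
  | zero => simp
  | succ n ih => simp [List.replicate_succ, pvCutL, hv, ih]


theorem pvCut_decode (k : Int) (runs : List (Int × Int)) (hruns : ∀ p ∈ runs, 1 ≤ p.2) :
    pvDecode (pvCut k runs).1 = (pvCutL k (pvDecode runs)).1 ∧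
      (pvCut k runs).2 = (pvCutL k (pvDecode runs)).2 := by
  induction runs with
  | nil => simp [pvCut, pvCutL, pvDecode]
  | cons hd tl ih =>
    obtain ⟨v, c⟩ := hd
    have hc : 1 ≤ c := hruns (v, c) (by simp)
    have htl : ∀ p ∈ tl, 1 ≤ p.2 := fun p hp => hruns p (by simp [hp])
    have hdec : pvDecode ((v, c) :: tl) = v :: (List.replicate (c.toNat - 1) v ++ pvDecode tl) := by
      simp only [pvDecode, List.flatMap_cons]
      have : c.toNat = 1 + (c.toNat - 1) := by omega
      rw [this, List.replicate_add]
      simp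
    by_cases hv : v ≥ k
    · rw [hdec]
      simp only [pvCut, pvCutL, if_pos hv]
      constructor
      · simp [pvDecode]
      · have hlen := pvDecode_length tl htl
        simp only [List.length_append, List.length_replicate]
        push_cast
        omega
    · rw [hdec]
      simp only [pvCut, pvCutL, if_neg hv]
      rw [pvCutL_replicate k v _ _ hv]
      obtain ⟨ih1, ih2⟩ := ih htl
      constructor
      · rw [show pvDecode ((v, c) :: (pvCut k tl).1) =
            v :: (List.replicate (c.toNat - 1) v ++ pvDecode (pvCut k tl).1) from ?_, ih1]
        simp only [pvDecode, List.flatMap_cons]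
        have : c.toNat = 1 + (c.toNat - 1) := by omega
        rw [this, List.replicate_add]
        simp
      · exact ih2

theorem pvInnerA_append (k : Int) (h : List Int) (b : Int) (acc : Int) (js : List Int)
    (hjs : ∀ j ∈ js, 1 ≤ j ∧ j ≤ (h.length : Int)) :
    pvInnerA k (h ++ [b]) acc js =
      ((pvInnerA k h acc js).1 ++ [b], (pvInnerA k h acc js).2) := by
  induction js with
  | nil => simp [pvInnerA]
  | cons j js ih =>
    obtain ⟨hj1, hj2⟩ := hjs j (by simp)
    have hnn : 0 ≤ j - 1 := by omega
    have hlt : (j - 1).toNat < h.length := by omega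
    have hget : PySem.List.pyGet? (h ++ [b]) (j - 1) = PySem.List.pyGet? h (j - 1) := by
      rw [PySem.List.pyGet?_of_nonneg _ hnn, PySem.List.pyGet?_of_nonneg _ hnn,
        List.getElem?_append_left hlt]
    have hgetsome : PySem.List.pyGet? h (j - 1) = some h[(j - 1).toNat] :=
      PySem.List.pyGet?_eq_some_getElem _ hnn (by omega)
    simp only [pvInnerA, hget, hgetsome]
    by_cases hv : h[(j - 1).toNat] ≥ k
    · simp only [if_pos hv]
      rw [PySem.List.slice_from _ (by omega : (0:Int) ≤ j),
        PySem.List.slice_from _ (by omega : (0:Int) ≤ j),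
        List.drop_append_of_le_length (by omega)]
    · simp only [if_neg hv]
      exact ih (fun x hx => hjs x (by simp [hx]))


theorem pvInnerA_char (k : Int) (h : List Int) (acc : Int) :
    pvInnerA k h acc (PySem.List.pyRange (h.length : Int) 0 (-1)) =
      ((pvCutL k h.reverse).1.reverse, acc + (pvCutL k h.reverse).2) := by
  induction h using List.reverseRecOn generalizing acc with
  | nil => simp [pvInnerA, pvCutL, PySem.List.pyRange_neg_one_eq_nil]
  | append_singleton h' b ih =>
    have hlen : ((h' ++ [b]).length : Int) = (h'.length : Int) + 1 := by simp
    rw [hlen, PySem.List.pyRange_neg_one_cons (by positivity)]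
    have hget : PySem.List.pyGet? (h' ++ [b]) ((h'.length : Int) + 1 - 1) = some b := by
      rw [show (h'.length : Int) + 1 - 1 = (h'.length : Int) by ring]
      exact PySem.List.pyGet?_append_length h' [] b
    simp only [pvInnerA, hget]
    by_cases hb : b ≥ k
    · simp only [if_pos hb]
      rw [PySem.List.slice_from _ (by positivity : (0:Int) ≤ (h'.length : Int) + 1)]
      have hdrop : List.drop ((h'.length : Int) + 1).toNat (h' ++ [b]) = [] := by
        apply List.drop_eq_nil_of_le
        simp
      rw [hdrop]
      simp only [List.reverse_append, List.reverse_cons, List.reverse_nil, List.nil_append,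
        List.cons_append, pvCutL, if_pos hb]
      simp only [Prod.mk.injEq, List.length_reverse]
      exact ⟨trivial, by omega⟩
    · simp only [if_neg hb]
      rw [show (h'.length : Int) + 1 - 1 = (h'.length : Int) by ring]
      have hjs : ∀ j ∈ PySem.List.pyRange (h'.length : Int) 0 (-1), 1 ≤ j ∧ j ≤ (h'.length : Int) := by
        intro j hj
        have := (PySem.List.mem_pyRange_neg_one).1 hj
        omega
      rw [pvInnerA_append k h' b acc _ hjs, ih]
      simp only [List.reverse_append, List.reverse_cons, List.reverse_nil, List.nil_append,
        List.cons_append, pvCutL, if_neg hb]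

theorem pv_main (k : Int) (l : List Int) :
    ∀ (res acc : Int) (hang : List Int) (runs : List (Int × Int)),
      pvDecode runs = hang.reverse → (∀ p ∈ runs, 1 ≤ p.2) →
      (l.foldl
        (fun (st : Int × Int × List Int) (i : Int) =>
          let hanging := st.2.2.map (fun x => PySem.Int.bor x i) ++ [i]
          let p := pvInnerA k hanging st.2.1 (PySem.List.pyRange (hanging.length : Int) 0 (-1))
          (st.1 + p.2, p.2, p.1)) (res, acc, hang)).1 =
      (l.foldl
        (fun (st : Int × Int × List (Int × Int)) (x : Int) =>
          let p := pvCut k (pvPush x 1 (pvOrAll st.2.2 x))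
          (st.1 + (st.2.1 + p.2), st.2.1 + p.2, p.1)) (res, acc, runs)).1 := by
  induction l with
  | nil => intro res acc hang runs _ _; rfl
  | cons x l ih =>
    intro res acc hang runs hdec hpos
    simp only [List.foldl_cons]
    -- relate the one-step results
    set hang1 := hang.map (fun y => PySem.Int.bor y x) ++ [x] with hh1
    set runs1 := pvPush x 1 (pvOrAll runs x) with hr1
    have hpos1 : ∀ p ∈ runs1, 1 ≤ p.2 :=
      pvPush_pos x 1 _ le_rfl (pvOrAll_pos runs x hpos)
    have hdec1 : pvDecode runs1 = hang1.reverse := by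
      rw [hr1, pvDecode_push x 1 _ (by omega) (pvOrAll_pos runs x hpos),
        pvDecode_orAll runs x hpos, hdec, hh1]
      simp [PySem.Int.bor_comm]
    have hcut := pvCut_decode k runs1 hpos1
    have hposc := pvCut_pos k runs1 hpos1
    have h2 : (pvCut k runs1).2 = (pvCutL k hang1.reverse).2 := by rw [hcut.2, hdec1]
    rw [pvInnerA_char k hang1 acc, h2]
    apply ih
    · rw [hcut.1, hdec1]
      simp
    · exact hposc
theorem calc_backwards_spec : Claim_equal_calc_backwards := by
  intro k integers _
  unfold Spec_calc_backwards calc_backwards calc_backwards_alt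
  exact pv_main k integers.reverse 0 0 [] [] rfl (by simp)
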